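-- pv_equiv track=rewrite | github.com/zhuli19901106/leetcode-zhuli | algorithms/2001-2500/2261_k-divisible-elements-subarrays_1_AC.py | countDistinct
-- ===== SOURCE A (Python) =====
-- from typing import List
--
-- def countDistinct(nums: List[int], k: int, p: int) -> int:
--     sm = [0]
--     n = len(nums)
--     for i in range(n):
--         sm.append(sm[-1] + (1 if nums[i] % p == 0 else 0))
--
--     res = set()
--     for i in range(n):
--         key = ''
--         for j in range(i, n):
--             key += str(nums[j]) + '_'
--
--             if sm[j + 1] - sm[i] <= k:
--                 res.add(key)
--
--     return len(res)
-- ===== SOURCE B (Python) =====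
-- def countDistinct(nums, k, p):
--     n = len(nums)
--     children = {}  # trie: (node_id, value) -> child node_id; root = 0
--     next_id = 1
--     count = 0
--     for i in range(n):
--         node = 0
--         cnt = 0
--         for j in range(i, n):
--             if nums[j] % p == 0:
--                 cnt += 1
--             if cnt > k:
--                 break
--             key = (node, nums[j])
--             if key in children:
--                 node = children[key]
--             else:
--                 children[key] = next_id
--                 node = next_id
--                 next_id += 1
--                 count += 1
--     return count
-- ===== Notes on version B (the rewrite author's own statement) =====
-- stated objective: faster
-- what changed: B replaces A's set of O(n)-long '_'-joined string keys by a trie of subarrays stored as a (node_id, value) -> node_id dictionary: each start walks/extends the trie under a running divisibility counter with an early break, and the answer is the number of trie nodes created, so no subarray is ever materialized.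
import Mathlib
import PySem

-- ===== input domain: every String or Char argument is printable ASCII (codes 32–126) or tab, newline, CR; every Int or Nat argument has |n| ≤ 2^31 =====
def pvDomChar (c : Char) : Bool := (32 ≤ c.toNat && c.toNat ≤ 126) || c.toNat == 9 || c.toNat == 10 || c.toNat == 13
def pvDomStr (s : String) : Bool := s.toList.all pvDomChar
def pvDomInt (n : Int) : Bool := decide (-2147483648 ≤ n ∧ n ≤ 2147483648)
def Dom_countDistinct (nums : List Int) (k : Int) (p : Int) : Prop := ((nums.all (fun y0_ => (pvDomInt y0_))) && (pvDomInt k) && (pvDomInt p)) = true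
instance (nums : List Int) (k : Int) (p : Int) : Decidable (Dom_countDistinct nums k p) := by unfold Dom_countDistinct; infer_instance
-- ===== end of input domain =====

-- B replaces A's set of '_'-joined string keys by a trie of subarrays ((node_id, value) -> node_id
-- dictionary) walked per start under a running divisibility counter with an early break; the answer
-- is the number of trie nodes created (objective: faster; measured).


-- ===== PORT A =====
-- sm = [0]; for i in range(n): sm.append(sm[-1] + (1 if nums[i] % p == 0 else 0))
def smFold (nums : List Int) (p : Int) : List Int :=
  (PySem.List.pyRange 0 (nums.length : Int) 1).foldl
    (fun sm i => sm ++ [PySem.List.pyGetD sm (-1) 0 +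
      (if PySem.Int.mod (PySem.List.pyGetD nums i 0) p == 0 then 1 else 0)]) [0]

def countDistinct (nums : List Int) (k : Int) (p : Int) : Int :=
  let sm := smFold nums p
  let n := nums.length
  let res : PySem.Set String := (PySem.List.pyRange 0 (n : Int) 1).foldl
    (fun res i =>
      ((PySem.List.pyRange i (n : Int) 1).foldl
        (fun (st : String × PySem.Set String) j =>
          let key := st.1 ++ PySem.Int.toStr (PySem.List.pyGetD nums j 0) ++ "_"
          let res := if PySem.List.pyGetD sm (j + 1) 0 - PySem.List.pyGetD sm i 0 ≤ k
                     then PySem.Set.add st.2 key else st.2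
          (key, res))
        ("", res)).2)
    PySem.Set.empty
  PySem.Set.len res

-- ===== PORT B =====
-- Source B's inner 'for j in range(i, n): … break …' loop; fuel = number of remaining indices n - j.
-- State: (children, next_id, count); walk state: j, cnt, node.
def trieInner (nums : List Int) (k p : Int) :
    Nat → Int → Int → Int → PySem.Dict (Int × Int) Int → Int → Int →
    PySem.Dict (Int × Int) Int × Int × Int
  | 0, _, _, _, ch, nid, count => (ch, nid, count)
  | Nat.succ m, j, cnt, node, ch, nid, count =>
    let cnt := if PySem.Int.mod (PySem.List.pyGetD nums j 0) p == 0 then cnt + 1 else cnt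
    if k < cnt then (ch, nid, count)
    else
      let key := (node, PySem.List.pyGetD nums j 0)
      match ch.get? key with
      | some b => trieInner nums k p m (j + 1) cnt b ch nid count
      | none => trieInner nums k p m (j + 1) cnt nid (ch.insert key nid) (nid + 1) (count + 1)

def countDistinct_alt (nums : List Int) (k : Int) (p : Int) : Int :=
  let n := nums.length
  let st := (PySem.List.pyRange 0 (n : Int) 1).foldl
    (fun (st : PySem.Dict (Int × Int) Int × Int × Int) i =>
      trieInner nums k p (n - i.toNat) i 0 0 st.1 st.2.1 st.2.2)
    (PySem.Dict.empty, 1, 0)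
  st.2.2

-- ===== PRECONDITION & SPEC =====
-- Pre_ excludes p = 0 with nums nonempty: there Python's 'nums[i] % p' raises ZeroDivisionError.
def Pre_countDistinct (nums : List Int) (k : Int) (p : Int) : Prop := p ≠ 0 ∨ nums = []
instance (nums : List Int) (k : Int) (p : Int) : Decidable (Pre_countDistinct nums k p) := by unfold Pre_countDistinct; infer_instance

def pvWitness_countDistinct : List Int × Int × Int := ([1, 2, 3, 4], 2, 2)

def Spec_countDistinct (nums : List Int) (k : Int) (p : Int) (out : Int) : Prop := out = countDistinct_alt nums k p
instance (nums : List Int) (k : Int) (p : Int) (out : Int) : Decidable (Spec_countDistinct nums k p out) := by unfold Spec_countDistinct; infer_instance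

-- ===== CLAIM (what is proved, stated in full; the proofs are below) =====
def Claim_equal_countDistinct : Prop := ∀ (nums : List Int) (k : Int) (p : Int), Dom_countDistinct nums k p → Pre_countDistinct nums k p → Spec_countDistinct nums k p (countDistinct nums k p)

-- ===== LEMMAS AND PROOFS =====

-- Intermediate specification: the SET of admissible subarrays (as List Int), built with the same
-- start/extend/break schedule as B's trie walk. A's result is its length via the injective string
-- encoding keyOf; B's result is its length via a bijection between trie nodes and its elements.
def altLoop (nums : List Int) (k p : Int) : Nat → Int → Int → List Int → PySem.Set (List Int) → PySem.Set (List Int)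
  | 0, _, _, _, seen => seen
  | Nat.succ m, j, cnt, cur, seen =>
    let cnt := if PySem.Int.mod (PySem.List.pyGetD nums j 0) p == 0 then cnt + 1 else cnt
    if k < cnt then seen
    else
      let cur := cur ++ [PySem.List.pyGetD nums j 0]
      altLoop nums k p m (j + 1) cnt cur (PySem.Set.add seen cur)

def specFold (nums : List Int) (k p : Int) : PySem.Set (List Int) :=
  (PySem.List.pyRange 0 (nums.length : Int) 1).foldl
    (fun seen i => altLoop nums k p (nums.length - i.toNat) i 0 [] seen) PySem.Set.empty

-- ---------- A-side: A's string set is the keyOf-image of specFold ----------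

-- pvD p nums t = number of elements divisible by p among the first t (value of A's sm[t])
def pvD (p : Int) (nums : List Int) (t : Nat) : Int :=
  ((nums.take t).countP (fun x => PySem.Int.mod x p == 0) : Int)

-- encC l = the List Char behind A's key string for the subarray l; keyOf l = that string
def encC : List Int → List Char
  | [] => []
  | x :: t => PySem.Int.toChars x ++ '_' :: encC t

def keyOf (l : List Int) : String := String.ofList (encC l)

lemma pvD_mono (p : Int) (nums : List Int) {s t : Nat} (h : s ≤ t) : pvD p nums s ≤ pvD p nums t := by
  unfold pvD
  have hsub : List.Sublist (nums.take s) (nums.take t) := by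
    have h1 : nums.take s = (nums.take t).take s := by rw [List.take_take, Nat.min_eq_left h]
    rw [h1]
    exact List.take_sublist _ _
  exact_mod_cast hsub.countP_le

lemma pvD_succ (p : Int) (nums : List Int) (t : Nat) (ht : t < nums.length) :
    pvD p nums (t + 1) =
      pvD p nums t + (if PySem.Int.mod (nums.getD t 0) p == 0 then 1 else 0) := by
  unfold pvD
  rw [List.take_add_one, List.getElem?_eq_getElem ht, List.countP_append]
  have hg : nums.getD t 0 = nums[t] := List.getD_eq_getElem nums 0 ht
  rw [hg]
  push_cast
  split <;> simp_all

lemma smFold_aux (nums : List Int) (p : Int) : ∀ (m : Nat), m ≤ nums.length →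
    ((List.range m).map (fun i : Nat => (i : Int))).foldl
      (fun sm i => sm ++ [PySem.List.pyGetD sm (-1) 0 +
        (if PySem.Int.mod (PySem.List.pyGetD nums i 0) p == 0 then 1 else 0)]) [0] =
    (List.range (m + 1)).map (pvD p nums) := by
  intro m
  induction m with
  | zero => intro _; simp [pvD]
  | succ m ih =>
    intro hm
    rw [List.range_succ, List.map_append, List.foldl_append, ih (by omega)]
    simp only [List.map_cons, List.map_nil, List.foldl_cons, List.foldl_nil]
    have h1 : (List.range (m + 1)).map (pvD p nums) =
        (List.range m).map (pvD p nums) ++ [pvD p nums m] := by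
      rw [List.range_succ, List.map_append]; rfl
    rw [h1, PySem.List.pyGetD_neg_one_append_singleton, PySem.List.pyGetD_natCast,
        ← pvD_succ p nums m (by omega)]
    rw [List.range_succ (n := m + 1), List.map_append, ← h1]
    rfl

lemma smFold_eq (nums : List Int) (p : Int) :
    smFold nums p = (List.range (nums.length + 1)).map (pvD p nums) := by
  unfold smFold
  rw [PySem.List.pyRange_zero_natCast]
  exact smFold_aux nums p nums.length le_rfl

lemma smFold_get (nums : List Int) (p : Int) (t : Nat) (h : t ≤ nums.length) :
    PySem.List.pyGetD (smFold nums p) (t : Int) 0 = pvD p nums t := by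
  rw [smFold_eq, PySem.List.pyGetD_natCast]
  exact PySem.List.getD_map_range _ _ _ _ (by omega)

-- decimal-digit facts
lemma digitChar_inj : ∀ d < 10, ∀ e < 10, Nat.digitChar d = Nat.digitChar e → d = e := by decide
lemma digitChar_ne_underscore : ∀ d < 10, Nat.digitChar d ≠ '_' := by decide
lemma digitChar_ne_dash : ∀ d < 10, Nat.digitChar d ≠ '-' := by decide

lemma toDigitsCore_eq (f : Nat) : ∀ (m : Nat) (acc : List Char), m < f →
    Nat.toDigitsCore 10 f m acc =
      (if m = 0 then ['0'] else ((Nat.digits 10 m).map Nat.digitChar).reverse) ++ acc := by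
  induction f with
  | zero => intro m acc h; omega
  | succ f ih =>
    intro m acc h
    simp only [Nat.toDigitsCore]
    by_cases h10 : m / 10 = 0
    · simp only [h10, if_true]
      by_cases hm : m = 0
      · subst hm; rfl
      · have hmlt : m < 10 := by omega
        rw [if_neg hm, Nat.digits_def' (by norm_num : 1 < 10) (Nat.pos_of_ne_zero hm), h10]
        simp [Nat.mod_eq_of_lt hmlt]
    · have hm : m ≠ 0 := by omega
      rw [if_neg h10, ih (m / 10) _ (by omega), if_neg h10]
      rw [if_neg hm, Nat.digits_def' (by norm_num : 1 < 10) (Nat.pos_of_ne_zero hm)]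
      simp [List.reverse_cons]

lemma toDigits10_eq (m : Nat) :
    Nat.toDigits 10 m = (if m = 0 then ['0'] else ((Nat.digits 10 m).map Nat.digitChar).reverse) := by
  have h := toDigitsCore_eq (m + 1) m [] (by omega)
  simpa [Nat.toDigits] using h

lemma toDigits10_mem {m : Nat} {c : Char} (h : c ∈ Nat.toDigits 10 m) :
    ∃ d, d < 10 ∧ c = Nat.digitChar d := by
  rw [toDigits10_eq] at h
  split at h
  · simp at h; exact ⟨0, by norm_num, by simp [h]; rfl⟩
  · rw [List.mem_reverse, List.mem_map] at h
    obtain ⟨d, hd, rfl⟩ := h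
    exact ⟨d, Nat.digits_lt_base (by norm_num) hd, rfl⟩

lemma map_digitChar_inj : ∀ (l1 l2 : List Nat), (∀ d ∈ l1, d < 10) → (∀ d ∈ l2, d < 10) →
    l1.map Nat.digitChar = l2.map Nat.digitChar → l1 = l2 := by
  intro l1
  induction l1 with
  | nil => intro l2 _ _ h; cases l2 <;> simp_all
  | cons x t ih =>
    intro l2 h1 h2 h
    cases l2 with
    | nil => simp_all
    | cons y u =>
      simp only [List.map_cons, List.cons.injEq] at h
      have hx := digitChar_inj x (h1 x (by simp)) y (h2 y (by simp)) h.1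
      rw [hx, ih u (fun d hd => h1 d (by simp [hd])) (fun d hd => h2 d (by simp [hd])) h.2]

lemma digits10_eq_nil_zero (b : Nat) (h : Nat.digits 10 b = [0]) : b = 0 := by
  have := Nat.ofDigits_digits 10 b
  rw [h] at this
  simpa [Nat.ofDigits] using this.symm

lemma toDigits10_inj {a b : Nat} (h : Nat.toDigits 10 a = Nat.toDigits 10 b) : a = b := by
  rw [toDigits10_eq, toDigits10_eq] at h
  split_ifs at h with h1 h2 h2
  · omega
  · exfalso
    have h' : (Nat.digits 10 b).map Nat.digitChar = ['0'] := by
      rw [← List.reverse_inj] at h; simpa using h.symm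
    cases hdig : Nat.digits 10 b with
    | nil => rw [hdig] at h'; simp at h'
    | cons x t =>
      rw [hdig] at h'
      simp only [List.map_cons, List.cons.injEq, List.map_eq_nil_iff] at h'
      have hx : x = 0 := digitChar_inj x (Nat.digits_lt_base (by norm_num) (hdig ▸ List.mem_cons_self)) 0 (by norm_num) (by simpa using h'.1)
      exact h2 (digits10_eq_nil_zero b (by rw [hdig, hx, h'.2]))
  · exfalso
    have h' : (Nat.digits 10 a).map Nat.digitChar = ['0'] := by
      rw [← List.reverse_inj] at h; simpa using h
    cases hdig : Nat.digits 10 a with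
    | nil => rw [hdig] at h'; simp at h'
    | cons x t =>
      rw [hdig] at h'
      simp only [List.map_cons, List.cons.injEq, List.map_eq_nil_iff] at h'
      have hx : x = 0 := digitChar_inj x (Nat.digits_lt_base (by norm_num) (hdig ▸ List.mem_cons_self)) 0 (by norm_num) (by simpa using h'.1)
      exact h1 (digits10_eq_nil_zero a (by rw [hdig, hx, h'.2]))
  · have hmap : (Nat.digits 10 a).map Nat.digitChar = (Nat.digits 10 b).map Nat.digitChar := by
      rwa [List.reverse_inj] at h
    have hdig := map_digitChar_inj _ _
      (fun d hd => Nat.digits_lt_base (by norm_num) hd)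
      (fun d hd => Nat.digits_lt_base (by norm_num) hd) hmap
    have := Nat.ofDigits_digits 10 a
    rw [hdig, Nat.ofDigits_digits] at this
    exact this.symm

lemma underscore_not_mem_toChars (n : Int) : '_' ∉ PySem.Int.toChars n := by
  unfold PySem.Int.toChars
  split
  · intro h
    rcases List.mem_cons.mp h with h | h
    · exact absurd h (by decide)
    · obtain ⟨d, hd, he⟩ := toDigits10_mem h
      exact digitChar_ne_underscore d hd he.symm
  · intro h
    obtain ⟨d, hd, he⟩ := toDigits10_mem h
    exact digitChar_ne_underscore d hd he.symm

lemma toChars_inj : Function.Injective PySem.Int.toChars := by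
  intro a b h
  unfold PySem.Int.toChars at h
  split_ifs at h with h1 h2 h2
  · simp only [List.cons.injEq] at h
    have := toDigits10_inj h.2
    omega
  · exfalso
    have hm : '-' ∈ Nat.toDigits 10 b.toNat := by rw [← h]; exact List.mem_cons_self
    obtain ⟨d, hd, he⟩ := toDigits10_mem hm
    exact digitChar_ne_dash d hd he.symm
  · exfalso
    have hm : '-' ∈ Nat.toDigits 10 a.toNat := by rw [h]; exact List.mem_cons_self
    obtain ⟨d, hd, he⟩ := toDigits10_mem hm
    exact digitChar_ne_dash d hd he.symm
  · have := toDigits10_inj h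
    omega

lemma sep_split : ∀ (a b u v : List Char), '_' ∉ a → '_' ∉ b →
    a ++ '_' :: u = b ++ '_' :: v → a = b ∧ u = v := by
  intro a
  induction a with
  | nil =>
    intro b u v _ hb h
    cases b with
    | nil => simpa using h
    | cons y t =>
      exfalso
      simp only [List.nil_append, List.cons_append, List.cons.injEq] at h
      exact hb (h.1 ▸ List.mem_cons_self)
  | cons x s ih =>
    intro b u v ha hb h
    cases b with
    | nil =>
      exfalso
      simp only [List.cons_append, List.nil_append, List.cons.injEq] at h
      exact ha (h.1 ▸ List.mem_cons_self)
    | cons y t =>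
      simp only [List.cons_append, List.cons.injEq] at h
      obtain ⟨rfl, h2⟩ := h
      have := ih t u v (fun hm => ha (List.mem_cons_of_mem _ hm)) (fun hm => hb (List.mem_cons_of_mem _ hm)) h2
      exact ⟨by rw [this.1], this.2⟩

lemma encC_inj : Function.Injective encC := by
  intro l1
  induction l1 with
  | nil =>
    intro l2 h
    cases l2 with
    | nil => rfl
    | cons y t =>
      exfalso
      simp only [encC] at h
      have := congrArg List.length h
      simp at this
  | cons x s ih =>
    intro l2 h
    cases l2 with
    | nil =>
      exfalso
      simp only [encC] at h
      have := congrArg List.length h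
      simp at this
    | cons y t =>
      simp only [encC] at h
      obtain ⟨h1, h2⟩ := sep_split _ _ _ _ (underscore_not_mem_toChars x) (underscore_not_mem_toChars y) h
      rw [toChars_inj h1, ih h2]

lemma keyOf_inj : Function.Injective keyOf := by
  intro a b h
  apply encC_inj
  have := congrArg String.toList h
  simpa [keyOf] using this

lemma encC_snoc (l : List Int) (x : Int) :
    encC (l ++ [x]) = encC l ++ (PySem.Int.toChars x ++ ['_']) := by
  induction l with
  | nil => simp [encC]
  | cons y t ih => simp [encC, ih]

lemma keyOf_snoc (l : List Int) (x : Int) :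
    keyOf (l ++ [x]) = keyOf l ++ PySem.Int.toStr x ++ "_" := by
  apply String.ext
  simp [keyOf, String.toList_append, String.toList_ofList, PySem.Int.toList_toStr, encC_snoc]

lemma keyOf_nil : keyOf [] = "" := by
  apply String.ext
  simp [keyOf, encC]

lemma add_map (s : PySem.Set (List Int)) (x : List Int) :
    PySem.Set.add (s.map keyOf) (keyOf x) = (PySem.Set.add s x).map keyOf := by
  have hc : PySem.Set.contains (s.map keyOf) (keyOf x) = PySem.Set.contains s x := by
    rw [Bool.eq_iff_iff, PySem.Set.contains_iff, PySem.Set.contains_iff]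
    simp [List.mem_map, keyOf_inj.eq_iff]
  unfold PySem.Set.add
  rw [hc]
  split
  · rfl
  · rw [List.map_append]; rfl

-- clean form of A's inner-loop step (smFold lookups already evaluated to pvD)
def stepA (nums : List Int) (k p : Int) (iN : Nat) (st : String × PySem.Set String) (j : Int) :
    String × PySem.Set String :=
  (st.1 ++ PySem.Int.toStr (PySem.List.pyGetD nums j 0) ++ "_",
   if pvD p nums (j.toNat + 1) - pvD p nums iN ≤ k
   then PySem.Set.add st.2 (st.1 ++ PySem.Int.toStr (PySem.List.pyGetD nums j 0) ++ "_")
   else st.2)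

lemma stepA_eval (nums : List Int) (k p : Int) (iN : Nat) (key : String) (res : PySem.Set String) (jN : Nat) :
    stepA nums k p iN (key, res) (jN : Int) =
      (key ++ PySem.Int.toStr (PySem.List.pyGetD nums (jN : Int) 0) ++ "_",
       if pvD p nums (jN + 1) - pvD p nums iN ≤ k
       then PySem.Set.add res (key ++ PySem.Int.toStr (PySem.List.pyGetD nums (jN : Int) 0) ++ "_")
       else res) := by
  simp [stepA]

lemma foldA_congr (nums : List Int) (k p : Int) (iN : Nat) (hi : iN ≤ nums.length) (jN : Nat)
    (st : String × PySem.Set String) :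
    (PySem.List.pyRange (jN : Int) (nums.length : Int) 1).foldl
      (fun (st : String × PySem.Set String) j =>
        (st.1 ++ PySem.Int.toStr (PySem.List.pyGetD nums j 0) ++ "_",
         if PySem.List.pyGetD (smFold nums p) (j + 1) 0 -
            PySem.List.pyGetD (smFold nums p) (iN : Int) 0 ≤ k
         then PySem.Set.add st.2 (st.1 ++ PySem.Int.toStr (PySem.List.pyGetD nums j 0) ++ "_")
         else st.2)) st =
    (PySem.List.pyRange (jN : Int) (nums.length : Int) 1).foldl (stepA nums k p iN) st := by
  apply PySem.List.foldl_congr_mem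
  intro acc j hj
  have hmem := PySem.List.mem_pyRange_one.mp hj
  have h0 : 0 ≤ j := le_trans (by exact_mod_cast Nat.zero_le jN) hmem.1
  have hjn : j = ((j.toNat : Nat) : Int) := (Int.toNat_of_nonneg h0).symm
  have hjlt : j.toNat < nums.length := by
    have := hmem.2; omega
  have hc1 : PySem.List.pyGetD (smFold nums p) (j + 1) 0 = pvD p nums (j.toNat + 1) := by
    rw [hjn, show (((j.toNat : Nat) : Int) + 1) = ((j.toNat + 1 : Nat) : Int) by push_cast; ring]
    exact smFold_get nums p (j.toNat + 1) (by omega)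
  have hc2 : PySem.List.pyGetD (smFold nums p) (iN : Int) 0 = pvD p nums iN :=
    smFold_get nums p iN hi
  rw [stepA, hc1, hc2]

-- A's inner loop adds nothing once the divisibility count has exceeded k
lemma innerA_dead (nums : List Int) (k p : Int) (iN : Nat) :
    ∀ (m jN : Nat), jN + m = nums.length →
    k < pvD p nums jN - pvD p nums iN →
    ∀ (key : String) (res : PySem.Set String),
    ((PySem.List.pyRange (jN : Int) (nums.length : Int) 1).foldl (stepA nums k p iN) (key, res)).2 = res := by
  intro m
  induction m with
  | zero =>
    intro jN hj _ key res
    rw [PySem.List.pyRange_one_eq_nil (by exact_mod_cast (show nums.length ≤ jN by omega))]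
    rfl
  | succ m ih =>
    intro jN hj hk key res
    have hlt : jN < nums.length := by omega
    have hmono := pvD_mono p nums (show jN ≤ jN + 1 by omega)
    rw [PySem.List.pyRange_one_cons (by exact_mod_cast hlt), List.foldl_cons, stepA_eval,
        if_neg (by omega),
        show ((jN : Int) + 1) = ((jN + 1 : Nat) : Int) by push_cast; ring]
    exact ih (jN + 1) (by omega) (by omega) _ res

-- A's inner loop from index jN equals (the keyOf-image of) the spec loop
lemma innerAB (nums : List Int) (k p : Int) (iN : Nat) :
    ∀ (m jN : Nat), jN + m = nums.length →
    ∀ (cur : List Int) (seen : PySem.Set (List Int)),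
    ((PySem.List.pyRange (jN : Int) (nums.length : Int) 1).foldl (stepA nums k p iN)
      (keyOf cur, seen.map keyOf)).2 =
    (altLoop nums k p m (jN : Int) (pvD p nums jN - pvD p nums iN) cur seen).map keyOf := by
  intro m
  induction m with
  | zero =>
    intro jN hj cur seen
    rw [PySem.List.pyRange_one_eq_nil (by exact_mod_cast (show nums.length ≤ jN by omega))]
    rfl
  | succ m ih =>
    intro jN hj cur seen
    have hlt : jN < nums.length := by omega
    rw [PySem.List.pyRange_one_cons (by exact_mod_cast hlt), List.foldl_cons, stepA_eval]
    simp only [altLoop]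
    have hcnt : (if (PySem.Int.mod (PySem.List.pyGetD nums (jN : Int) 0) p == 0) = true
        then pvD p nums jN - pvD p nums iN + 1 else pvD p nums jN - pvD p nums iN) =
        pvD p nums (jN + 1) - pvD p nums iN := by
      rw [PySem.List.pyGetD_natCast, pvD_succ p nums jN hlt]
      split <;> ring
    rw [hcnt]
    by_cases hc : pvD p nums (jN + 1) - pvD p nums iN ≤ k
    · rw [if_neg (not_lt.mpr hc), if_pos hc,
          show (keyOf cur ++ PySem.Int.toStr (PySem.List.pyGetD nums (jN : Int) 0) ++ "_") =
            keyOf (cur ++ [PySem.List.pyGetD nums (jN : Int) 0]) from (keyOf_snoc _ _).symm,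
          add_map,
          show ((jN : Int) + 1) = ((jN + 1 : Nat) : Int) by push_cast; ring]
      exact ih (jN + 1) (by omega) _ _
    · rw [if_pos (not_le.mp hc), if_neg hc,
          show ((jN : Int) + 1) = ((jN + 1 : Nat) : Int) by push_cast; ring]
      exact innerA_dead nums k p iN m (jN + 1) (by omega) (by omega) _ _

lemma outerAB (nums : List Int) (k p : Int) :
    ∀ (is : List Nat), (∀ i ∈ is, i < nums.length) →
    ∀ (seen : PySem.Set (List Int)),
    (is.map (fun i : Nat => (i : Int))).foldl
      (fun res i =>
        ((PySem.List.pyRange i (nums.length : Int) 1).foldl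
          (fun (st : String × PySem.Set String) j =>
            (st.1 ++ PySem.Int.toStr (PySem.List.pyGetD nums j 0) ++ "_",
             if PySem.List.pyGetD (smFold nums p) (j + 1) 0 -
                PySem.List.pyGetD (smFold nums p) i 0 ≤ k
             then PySem.Set.add st.2 (st.1 ++ PySem.Int.toStr (PySem.List.pyGetD nums j 0) ++ "_")
             else st.2))
          ("", res)).2)
      (seen.map keyOf) =
    ((is.map (fun i : Nat => (i : Int))).foldl
      (fun seen i => altLoop nums k p (nums.length - i.toNat) i 0 [] seen) seen).map keyOf := by
  intro is
  induction is with
  | nil => intro _ seen; rfl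
  | cons i t ih =>
    intro hmem seen
    have hi : i < nums.length := hmem i (by simp)
    simp only [List.map_cons, List.foldl_cons]
    rw [show ("" : String) = keyOf [] from keyOf_nil.symm,
        foldA_congr nums k p i (by omega) i (keyOf [], seen.map keyOf)]
    have h1 := innerAB nums k p i (nums.length - i) i (by omega) [] seen
    rw [show pvD p nums i - pvD p nums i = 0 by ring] at h1
    rw [h1, Int.toNat_natCast]
    exact ih (fun j hj => hmem j (by simp [hj])) _

lemma A_eq_spec (nums : List Int) (k p : Int) :
    countDistinct nums k p = PySem.Set.len (specFold nums k p) := by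
  unfold countDistinct specFold
  simp only [PySem.List.pyRange_zero_natCast]
  rw [show (PySem.Set.empty : PySem.Set String) =
      (PySem.Set.empty : PySem.Set (List Int)).map keyOf from rfl,
      outerAB nums k p (List.range nums.length) (fun i hi => List.mem_range.mp hi) PySem.Set.empty]
  simp [PySem.Set.len]

-- ---------- B-side: trie nodes are in bijection with the elements of specFold ----------

-- Trie invariant: f names the subarray stored at each node id (root 0 = []); ids 1..nid-1 are
-- exactly the elements of S, without repetition, and the children dict is the edge relation.
def TInv (ch : PySem.Dict (Int × Int) Int) (nid : Int) (S : PySem.Set (List Int)) (f : Int → List Int) : Prop :=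
  f 0 = [] ∧
  nid = PySem.Set.len S + 1 ∧
  (∀ a v b, ch.get? (a, v) = some b → 0 ≤ a ∧ a < nid ∧ 1 ≤ b ∧ b < nid ∧ f b = f a ++ [v]) ∧
  (∀ b : Int, 1 ≤ b → b < nid → f b ∈ S) ∧
  (∀ s ∈ S, ∃ a v b, ch.get? (a, v) = some b ∧ f a ++ [v] = s) ∧
  (∀ a b : Int, 0 ≤ a → a < nid → 0 ≤ b → b < nid → f a = f b → a = b)

lemma TInv_lookup_none (ch : PySem.Dict (Int × Int) Int) (nid : Int) (S : PySem.Set (List Int))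
    (f : Int → List Int) (hI : TInv ch nid S f) (node v : Int)
    (h0 : 0 ≤ node) (h1 : node < nid) (hn : ch.get? (node, v) = none) :
    f node ++ [v] ∉ S := by
  obtain ⟨-, -, hedge, -, hcover, hinj⟩ := hI
  intro hmem
  obtain ⟨a, v', b, hget, heq⟩ := hcover _ hmem
  obtain ⟨ha0, ha1, -, -, -⟩ := hedge a v' b hget
  have hv : v' = v ∧ f a = f node := by
    constructor
    · have := congrArg (fun l => l.getLast?) heq
      simpa using this
    · have := congrArg (fun l => l.dropLast) heq
      simpa using this
  have : a = node := hinj a node ha0 ha1 h0 h1 hv.2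
  rw [this, hv.1, hn] at hget
  simp at hget

lemma Set_len_nonneg (S : PySem.Set (List Int)) : 0 ≤ PySem.Set.len S := by
  simp [PySem.Set.len]

lemma trieInner_sim (nums : List Int) (k p : Int) :
    ∀ (m : Nat) (j cnt node : Int) (ch : PySem.Dict (Int × Int) Int) (nid count : Int)
      (S : PySem.Set (List Int)) (f : Int → List Int),
    TInv ch nid S f → 0 ≤ node → node < nid → count = nid - 1 →
    ∃ f',
      TInv (trieInner nums k p m j cnt node ch nid count).1
           (trieInner nums k p m j cnt node ch nid count).2.1
           (altLoop nums k p m j cnt (f node) S) f' ∧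
      (trieInner nums k p m j cnt node ch nid count).2.2 =
        (trieInner nums k p m j cnt node ch nid count).2.1 - 1 := by
  intro m
  induction m with
  | zero =>
    intro j cnt node ch nid count S f hI _ _ hc
    exact ⟨f, hI, hc⟩
  | succ m ih =>
    intro j cnt node ch nid count S f hI h0 h1 hc
    simp only [trieInner, altLoop]
    set v := PySem.List.pyGetD nums j 0 with hv
    set cnt' := if (PySem.Int.mod v p == 0) = true then cnt + 1 else cnt with hcnt
    by_cases hk : k < cnt'
    · rw [if_pos hk, if_pos hk]
      exact ⟨f, hI, hc⟩
    · rw [if_neg hk, if_neg hk]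
      cases hget : ch.get? (node, v) with
      | some b =>
        have hedge := hI.2.2.1
        have hmemS := hI.2.2.2.1
        obtain ⟨-, -, hb1, hb2, hfb⟩ := hedge node v b hget
        have hS : PySem.Set.add S (f node ++ [v]) = S := by
          apply PySem.Set.add_of_mem
          rw [← hfb]
          exact hmemS b hb1 hb2
        have := ih (j + 1) cnt' b ch nid count S f hI (by omega) hb2 hc
        rw [hfb] at this
        rw [hS]
        exact this
      | none =>
        have hnotmem : f node ++ [v] ∉ S := TInv_lookup_none ch nid S f hI node v h0 h1 hget
        have hlen0 := Set_len_nonneg S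
        obtain ⟨hroot, hnid, hedge, hmemS, hcover, hinj⟩ := hI
        have hnode_ne : node ≠ nid := by omega
        have hf'nid : (fun x => if x = nid then f node ++ [v] else f x) nid = f node ++ [v] := by
          simp
        have hf'_of_lt : ∀ x : Int, x < nid → (fun x => if x = nid then f node ++ [v] else f x) x = f x := by
          intro x hx
          simp only []
          rw [if_neg (by omega)]
        have hSadd : PySem.Set.add S (f node ++ [v]) = S ++ [f node ++ [v]] :=
          PySem.Set.add_of_not_mem hnotmem
        have hlen' : PySem.Set.len (PySem.Set.add S (f node ++ [v])) = PySem.Set.len S + 1 := by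
          rw [hSadd]; simp [PySem.Set.len]
        have hI' : TInv (ch.insert (node, v) nid) (nid + 1) (PySem.Set.add S (f node ++ [v]))
            (fun x => if x = nid then f node ++ [v] else f x) := by
          refine ⟨?_, by omega, ?_, ?_, ?_, ?_⟩
          · rw [hf'_of_lt 0 (by omega)]
            exact hroot
          · intro a w b hg
            rw [PySem.Dict.get?_insert] at hg
            by_cases hkey : (a, w) = (node, v)
            · rw [if_pos hkey] at hg
              have ha : a = node := congrArg Prod.fst hkey
              have hw : w = v := congrArg Prod.snd hkey
              have hb : b = nid := by injection hg with h; omega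
              refine ⟨by omega, by omega, by omega, by omega, ?_⟩
              rw [ha, hw, hb, hf'nid, hf'_of_lt node h1]
            · rw [if_neg hkey] at hg
              obtain ⟨ha0, ha1, hb1, hb2, hfb⟩ := hedge a w b hg
              refine ⟨ha0, by omega, hb1, by omega, ?_⟩
              rw [hf'_of_lt a ha1, hf'_of_lt b hb2]
              exact hfb
          · intro b hb1 hb2
            rw [PySem.Set.mem_add]
            by_cases hbn : b = nid
            · right
              rw [hbn, hf'nid]
            · left
              rw [hf'_of_lt b (by omega)]
              exact hmemS b hb1 (by omega)
          · intro s hs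
            rw [PySem.Set.mem_add] at hs
            cases hs with
            | inl hs =>
              obtain ⟨a, w, b, hg, heq⟩ := hcover s hs
              obtain ⟨ha0, ha1, -, -, -⟩ := hedge a w b hg
              refine ⟨a, w, b, ?_, ?_⟩
              · rw [PySem.Dict.get?_insert, if_neg ?_]
                · exact hg
                · intro hkey
                  have ha : a = node := congrArg Prod.fst hkey
                  have hw : w = v := congrArg Prod.snd hkey
                  rw [ha, hw, hget] at hg
                  simp at hg
              · rw [hf'_of_lt a ha1]
                exact heq
            | inr hs =>
              refine ⟨node, v, nid, ?_, ?_⟩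
              · rw [PySem.Dict.get?_insert, if_pos rfl]
              · rw [hf'_of_lt node h1, hs]
          · intro a b ha0 ha1 hb0 hb1 hfe
            by_cases han : a = nid <;> by_cases hbn : b = nid
            · omega
            · exfalso
              rw [han, hf'nid, hf'_of_lt b (by omega)] at hfe
              apply hnotmem
              by_cases hb0' : b = 0
              · rw [hb0', hroot] at hfe
                exact absurd hfe.symm (by simp)
              · rw [hfe]
                exact hmemS b (by omega) (by omega)
            · exfalso
              rw [hbn, hf'nid, hf'_of_lt a (by omega)] at hfe
              apply hnotmem
              by_cases ha0' : a = 0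
              · rw [ha0', hroot] at hfe
                exact absurd hfe (by simp)
              · rw [← hfe]
                exact hmemS a (by omega) (by omega)
            · rw [hf'_of_lt a (by omega), hf'_of_lt b (by omega)] at hfe
              exact hinj a b ha0 (by omega) hb0 (by omega) hfe
        have := ih (j + 1) cnt' nid (ch.insert (node, v) nid) (nid + 1) (count + 1)
          (PySem.Set.add S (f node ++ [v])) (fun x => if x = nid then f node ++ [v] else f x)
          hI' (by omega) (by omega) (by omega)
        rw [hf'nid] at this
        exact this

lemma outer_sim (nums : List Int) (k p : Int) :
    ∀ (is : List Int) (ch : PySem.Dict (Int × Int) Int) (nid count : Int)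
      (S : PySem.Set (List Int)) (f : Int → List Int),
    TInv ch nid S f → count = nid - 1 →
    ∃ f',
      TInv (is.foldl (fun st i => trieInner nums k p (nums.length - i.toNat) i 0 0 st.1 st.2.1 st.2.2)
              (ch, nid, count)).1
           (is.foldl (fun st i => trieInner nums k p (nums.length - i.toNat) i 0 0 st.1 st.2.1 st.2.2)
              (ch, nid, count)).2.1
           (is.foldl (fun S i => altLoop nums k p (nums.length - i.toNat) i 0 [] S) S) f' ∧
      (is.foldl (fun st i => trieInner nums k p (nums.length - i.toNat) i 0 0 st.1 st.2.1 st.2.2)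
          (ch, nid, count)).2.2 =
        (is.foldl (fun st i => trieInner nums k p (nums.length - i.toNat) i 0 0 st.1 st.2.1 st.2.2)
            (ch, nid, count)).2.1 - 1 := by
  intro is
  induction is with
  | nil =>
    intro ch nid count S f hI hc
    exact ⟨f, hI, hc⟩
  | cons i t ih =>
    intro ch nid count S f hI hc
    simp only [List.foldl_cons]
    have hlen0 := Set_len_nonneg S
    have hnid1 : 0 < nid := by
      obtain ⟨-, hnid, -⟩ := hI
      omega
    obtain ⟨f1, hI1, hc1⟩ := trieInner_sim nums k p (nums.length - i.toNat) i 0 0 ch nid count S f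
      hI le_rfl hnid1 hc
    rw [hI.1] at hI1
    obtain ⟨f', hI', hc'⟩ := ih _ _ _ _ f1 hI1 hc1
    exact ⟨f', hI', hc'⟩

lemma TInv_empty : TInv PySem.Dict.empty 1 PySem.Set.empty (fun _ => []) := by
  refine ⟨rfl, by simp [PySem.Set.len, PySem.Set.empty], ?_, ?_, ?_, ?_⟩
  · intro a v b hg
    rw [PySem.Dict.get?_empty] at hg
    simp at hg
  · intro b hb1 hb2; omega
  · intro s hs; exact absurd hs (by simp [PySem.Set.empty])
  · intro a b ha0 ha1 hb0 hb1 _; omega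

lemma B_eq_spec (nums : List Int) (k p : Int) :
    countDistinct_alt nums k p = PySem.Set.len (specFold nums k p) := by
  unfold countDistinct_alt specFold
  obtain ⟨f', hI', hc'⟩ := outer_sim nums k p
    (PySem.List.pyRange 0 (nums.length : Int) 1) PySem.Dict.empty 1 0 PySem.Set.empty
    (fun _ => []) TInv_empty (by omega)
  obtain ⟨-, hnid, -⟩ := hI'
  simp only []
  omega

-- ===== VERDICT (by name: the statement is the Claim_ definition above) =====
theorem countDistinct_spec : Claim_equal_countDistinct := by
  intro nums k p _ _
  unfold Spec_countDistinct
  rw [A_eq_spec, B_eq_spec]
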